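-- pv_equiv track=rewrite | github.com/rjherrera/IIC2343 | T1/14632152.py | suma_carry
-- ===== SOURCE A (Python) =====
-- def suma_carry(base, representacion, sumando):
--     resultado = representacion[:]
--     for i in range(len(representacion) - 1, -1, -1):
--         if representacion[i] + sumando < base:
--             resultado[i] = representacion[i] + sumando
--             break
--         resultado[i] = 0
--     return resultado
-- ===== SOURCE B (Python) =====
-- def suma_carry(base, representacion, sumando):
--     idx = None
--     for i, d in enumerate(representacion):
--         if d + sumando < base:
--             idx = i
--     if idx is None:
--         return [0] * len(representacion)
--     return (representacion[:idx]
--             + [representacion[idx] + sumando]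
--             + [0] * (len(representacion) - 1 - idx))
-- ===== Notes on version B (the rewrite author's own statement) =====
-- stated objective: simpler
-- what changed: B finds the last position where the digit plus sumando stays below base with a single forward scan, then assembles the result non-mutatingly from slices and a zero block, instead of A's backward mutate-and-break loop over a copy.
import Mathlib
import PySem

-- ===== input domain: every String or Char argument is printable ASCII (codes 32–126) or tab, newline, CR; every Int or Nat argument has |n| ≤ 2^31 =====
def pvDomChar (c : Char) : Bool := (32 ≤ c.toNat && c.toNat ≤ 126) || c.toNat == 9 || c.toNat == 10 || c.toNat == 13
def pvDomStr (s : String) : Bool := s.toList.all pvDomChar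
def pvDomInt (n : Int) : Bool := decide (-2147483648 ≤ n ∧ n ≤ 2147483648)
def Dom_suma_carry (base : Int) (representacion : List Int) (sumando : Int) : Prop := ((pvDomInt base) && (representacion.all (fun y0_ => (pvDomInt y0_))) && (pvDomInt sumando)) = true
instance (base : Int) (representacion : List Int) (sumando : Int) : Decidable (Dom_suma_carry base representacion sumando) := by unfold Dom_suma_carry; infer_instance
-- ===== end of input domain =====

-- B replaces A's backward mutate-and-break loop by one forward scan for the last
-- fitting position plus non-mutating slice/zero-block assembly (objective: simpler).

-- ===== PORT A =====
-- A's loop 'for i in range(len(representacion)-1,-1,-1)' counts k+1 remaining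
-- iterations; all indices are in range, so reads/writes use the total forms
-- pyGetD / pySetD (exact there). The 'break' is the non-recursive first branch.
def sumaLoopA (base : Int) (representacion sumando_rep : List Int) (sumando : Int) : Nat → List Int → List Int
  | 0, res => res
  | k+1, res =>
    let d := PySem.List.pyGetD representacion (k : Int) 0
    if d + sumando < base then
      PySem.List.pySetD res (k : Int) (d + sumando)
    else
      sumaLoopA base representacion sumando_rep sumando k (PySem.List.pySetD res (k : Int) 0)

def suma_carry (base : Int) (representacion : List Int) (sumando : Int) : List Int :=
  sumaLoopA base representacion representacion sumando representacion.length representacion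

-- ===== PORT B =====
-- forward scan keeping the last index whose digit + sumando < base
def suma_carry_alt (base : Int) (representacion : List Int) (sumando : Int) : List Int :=
  let idx := (PySem.List.enumerate representacion 0).foldl
      (fun acc p => if p.2 + sumando < base then some p.1 else acc) (none : Option Int)
  match idx with
  | none => List.replicate representacion.length 0
  | some i =>
      PySem.List.slice representacion none (some i)
        ++ [PySem.List.pyGetD representacion i 0 + sumando]
        ++ List.replicate ((representacion.length : Int) - 1 - i).toNat 0

-- ===== PRECONDITION & SPEC =====
def Spec_suma_carry (base : Int) (representacion : List Int) (sumando : Int) (out : List Int) : Prop := out = suma_carry_alt base representacion sumando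
instance (base : Int) (representacion : List Int) (sumando : Int) (out : List Int) : Decidable (Spec_suma_carry base representacion sumando out) := by unfold Spec_suma_carry; infer_instance

-- ===== CLAIM (what is proved, stated in full; the proofs are below) =====
def Claim_equal_suma_carry : Prop := ∀ (base : Int) (representacion : List Int) (sumando : Int), Dom_suma_carry base representacion sumando → Spec_suma_carry base representacion sumando (suma_carry base representacion sumando)

-- ===== LEMMAS AND PROOFS =====

-- largest j < k with rep[j] + s < base (the index where both programs stop zeroing)
def lastC (base s : Int) (rep : List Int) : Nat → Option Nat
  | 0 => none
  | k+1 => if rep[k]?.getD 0 + s < base then some k else lastC base s rep k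

-- the common closed form of both results on the first k positions
def outC (base s : Int) (rep : List Int) (k : Nat) : List Int :=
  match lastC base s rep k with
  | none => List.replicate k 0
  | some j => rep.take j ++ [rep[j]?.getD 0 + s] ++ List.replicate (k - 1 - j) 0

def castO : Option Nat → Option Int
  | none => none
  | some j => some (j : Int)

theorem lastC_lt {base s : Int} {rep : List Int} {k j : Nat}
    (h : lastC base s rep k = some j) : j < k := by
  induction k with
  | zero => simp [lastC] at h
  | succ k ih =>
    unfold lastC at h
    split at h
    · cases h; omega
    · exact Nat.lt_succ_of_lt (ih h)

theorem sumaLoopA_eq_outC (base s : Int) (rep : List Int) :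
    ∀ (k : Nat) (res : List Int), k ≤ rep.length → res.length = rep.length →
      res.take k = rep.take k →
      sumaLoopA base rep rep s k res = outC base s rep k ++ res.drop k := by
  intro k
  induction k with
  | zero => intro res _ _ _; simp [sumaLoopA, outC, lastC]
  | succ k ih =>
    intro res hk hlen htake
    have hklen : k < res.length := by omega
    have hget : PySem.List.pyGetD rep (k : Int) 0 = rep[k]?.getD 0 := by
      simp [PySem.List.pyGetD_natCast, List.getD]
    unfold sumaLoopA
    simp only [hget, PySem.List.pySetD_natCast]
    have htk : res.take k = rep.take k := by
      have := congrArg (List.take k) htake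
      simpa [List.take_take] using this
    by_cases hc : rep[k]?.getD 0 + s < base
    · simp only [if_pos hc]
      rw [List.set_eq_take_cons_drop _ hklen]
      have : lastC base s rep (k+1) = some k := by simp [lastC, hc]
      simp [outC, this, htk, List.append_assoc]
    · simp only [if_neg hc]
      have hlen' : (res.set k 0).length = rep.length := by simpa using hlen
      have htake' : (res.set k 0).take k = rep.take k := by
        rw [List.take_set_of_le (le_refl k)]; exact htk
      rw [ih (res.set k 0) (by omega) hlen' htake']
      have hdrop : (res.set k 0).drop k = 0 :: res.drop (k+1) := by
        rw [List.set_eq_take_cons_drop _ hklen]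
        rw [List.drop_append_of_le_length (by simp [List.length_take]; omega)]
        simp
      rw [hdrop]
      have hlast : lastC base s rep (k+1) = lastC base s rep k := by
        simp [lastC, hc]
      unfold outC
      rw [hlast]
      cases hcase : lastC base s rep k with
      | none =>
        simp [List.replicate_succ' (n := k)]
      | some j =>
        have hj : j < k := lastC_lt hcase
        have hkj1 : k + 1 - 1 - j = (k - 1 - j) + 1 := by omega
        have hkj2 : k - j = (k - 1 - j) + 1 := by omega
        simp [hkj2, List.replicate_succ' (n := k - 1 - j), List.append_assoc]

theorem suma_carry_eq_outC (base : Int) (rep : List Int) (s : Int) :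
    suma_carry base rep s = outC base s rep rep.length := by
  unfold suma_carry
  rw [sumaLoopA_eq_outC base s rep rep.length rep (le_refl _) rfl rfl]
  simp

theorem foldl_enum_eq_lastC (base s : Int) (rep : List Int) :
    ∀ (k : Nat),
      (PySem.List.pyRange 0 (k : Int) 1).foldl
        (fun acc j => if PySem.List.pyGetD rep j 0 + s < base then some j else acc)
        (none : Option Int)
      = castO (lastC base s rep k) := by
  intro k
  induction k with
  | zero => simp [PySem.List.pyRange_one_eq_nil, lastC, castO]
  | succ k ih =>
    have hsplit : PySem.List.pyRange 0 ((k : Int) + 1) 1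
        = PySem.List.pyRange 0 (k : Int) 1 ++ [(k : Int)] :=
      PySem.List.pyRange_one_succ_right (by positivity)
    push_cast
    rw [hsplit, List.foldl_append, ih]
    simp only [List.foldl_cons, List.foldl_nil]
    by_cases hc : rep[k]?.getD 0 + s < base
    · simp [PySem.List.pyGetD_natCast, List.getD, hc, lastC, castO]
    · simp [PySem.List.pyGetD_natCast, List.getD, hc, lastC, castO]

theorem suma_carry_alt_eq_outC (base : Int) (rep : List Int) (s : Int) :
    suma_carry_alt base rep s = outC base s rep rep.length := by
  unfold suma_carry_alt
  rw [PySem.List.enumerate_eq_map_pyRange (d := 0), List.foldl_map]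
  have hfold := foldl_enum_eq_lastC base s rep rep.length
  simp only [PySem.List.len_eq] at hfold ⊢
  rw [hfold]
  unfold outC
  cases hcase : lastC base s rep rep.length with
  | none => simp [castO]
  | some j =>
    have hj : j < rep.length := lastC_lt hcase
    have h2 : ((rep.length : Int) - 1 - (j : Int)).toNat = rep.length - 1 - j := by
      omega
    simp [castO, PySem.List.slice_to_natCast, PySem.List.pyGetD_natCast, List.getD, h2]

-- ===== VERDICT (by name: the statement is the Claim_ definition above) =====
theorem suma_carry_spec : Claim_equal_suma_carry := by
  intro base rep s _
  unfold Spec_suma_carry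
  rw [suma_carry_eq_outC, suma_carry_alt_eq_outC]
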